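-- pv_equiv track=rewrite | github.com/rhaps0dy/ts-baselines | timeless-imputation/category_dae.py | compress_categories
-- ===== SOURCE A (Python) =====
-- def compress_categories(possible_cats):
--     """Makes a possibly sparse array of categories, with all integers >1, of
--     length `n`; into a dictionary that maps the first `n` natural numbers to
--     these categories."""
--     possible_cats.sort()
--     rearrange_cats = [None]*len(possible_cats)
--     i = 0
--     j = 0
--     while i < len(possible_cats):
--         c = possible_cats[i]
--         while j+1 < c and i < len(possible_cats):
--             rearrange_cats[j] = possible_cats[-1]
--             possible_cats = possible_cats[:-1]
--             j += 1
--         if i < len(possible_cats):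
--             rearrange_cats[j] = c
--         j += 1
--         i += 1
--     return rearrange_cats
-- ===== SOURCE B (Python) =====
-- def compress_categories(possible_cats):
--     """Same mapping as A, computed with two pointers on the sorted list
--     instead of repeatedly slicing off the last element (O(n log n) vs O(n^2))."""
--     possible_cats.sort()
--     n = len(possible_cats)
--     out = [None] * n
--     lo, hi, j = 0, n - 1, 0
--     while lo <= hi:
--         if j + 1 < possible_cats[lo]:
--             out[j] = possible_cats[hi]
--             hi -= 1
--         else:
--             out[j] = possible_cats[lo]
--             lo += 1
--         j += 1
--     return out
-- ===== Notes on version B (the rewrite author's own statement) =====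
-- stated objective: faster
-- what changed: A repeatedly copies the list via possible_cats[:-1] slicing while scanning, O(n^2); B walks the sorted list once with two pointers (lo from the front, hi from the back) filling each output slot directly, O(n log n) dominated by the sort.
import Mathlib
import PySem

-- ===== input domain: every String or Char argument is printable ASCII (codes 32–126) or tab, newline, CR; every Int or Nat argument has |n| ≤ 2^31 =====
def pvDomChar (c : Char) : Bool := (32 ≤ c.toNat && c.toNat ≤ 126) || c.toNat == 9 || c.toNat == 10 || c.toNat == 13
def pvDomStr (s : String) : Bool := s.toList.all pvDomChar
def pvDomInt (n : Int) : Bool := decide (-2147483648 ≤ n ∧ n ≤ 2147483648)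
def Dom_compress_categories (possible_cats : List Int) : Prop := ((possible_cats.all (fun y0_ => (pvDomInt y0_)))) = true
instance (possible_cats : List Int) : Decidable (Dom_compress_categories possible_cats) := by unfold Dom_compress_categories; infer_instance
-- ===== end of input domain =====

-- B replaces A's repeated `possible_cats[:-1]` slicing with one two-pointer sweep of
-- the sorted list (objective: faster). A sorts its argument in place and B performs
-- the same in-place sort; the equivalence proved here is about the return value.

-- ===== PORT A =====
-- inner `while j+1 < c and i < len(possible_cats)` loop of A
def innerA (pc : List Int) (r : List (Option Int)) (i j : Nat) (c : Int) :
    List Int × List (Option Int) × Nat :=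
  if (j : Int) + 1 < c ∧ i < pc.length then
    innerA pc.dropLast (r.set j (PySem.List.pyGet? pc (-1))) i (j + 1) c
  else (pc, r, j)
termination_by pc.length
decreasing_by simp_all [List.length_dropLast]; omega

-- cited by outerA's decreasing_by (the working list never grows across the inner loop)
theorem innerA_fst_length_le (pc : List Int) (r : List (Option Int)) (i j : Nat) (c : Int) :
    (innerA pc r i j c).1.length ≤ pc.length := by
  fun_induction innerA pc r i j c with
  | case1 pc r j h ih =>
    exact ih.trans (by rw [List.length_dropLast]; omega)
  | case2 pc r j h => exact le_rfl

-- outer `while i < len(possible_cats)` loop of A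
def outerA (pc : List Int) (r : List (Option Int)) (i j : Nat) : List (Option Int) :=
  if h : i < pc.length then
    let c := pc.getD i 0
    let t := innerA pc r i j c
    let r' := if i < t.1.length then t.2.1.set t.2.2 (some c) else t.2.1
    outerA t.1 r' (i + 1) (t.2.2 + 1)
  else r
termination_by pc.length - i
decreasing_by
  have := innerA_fst_length_le pc r i j (pc.getD i 0)
  omega

def compress_categories (possible_cats : List Int) : List (Option Int) :=
  let s := PySem.List.sorted possible_cats (fun x => x) false   -- possible_cats.sort()
  let rearrange := List.replicate s.length none                 -- [None]*len(possible_cats)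
  outerA s rearrange 0 0

-- ===== PORT B =====
-- `while lo <= hi` loop of B
def loopB (s : List Int) (out : List (Option Int)) (lo : Nat) (hi : Int) (j : Nat) :
    List (Option Int) :=
  if (lo : Int) ≤ hi then
    if (j : Int) + 1 < (PySem.List.pyGet? s (lo : Int)).getD 0 then
      loopB s (out.set j (PySem.List.pyGet? s hi)) lo (hi - 1) (j + 1)
    else
      loopB s (out.set j (PySem.List.pyGet? s (lo : Int))) (lo + 1) hi (j + 1)
  else out
termination_by (hi + 1 - lo).toNat
decreasing_by all_goals omega

def compress_categories_alt (possible_cats : List Int) : List (Option Int) :=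
  let s := PySem.List.sorted possible_cats (fun x => x) false   -- possible_cats.sort()
  let out := List.replicate s.length none                       -- [None]*n
  loopB s out 0 ((s.length : Int) - 1) 0

-- ===== PRECONDITION & SPEC =====
def Spec_compress_categories (possible_cats : List Int) (out : List (Option Int)) : Prop := out = compress_categories_alt possible_cats
instance (possible_cats : List Int) (out : List (Option Int)) : Decidable (Spec_compress_categories possible_cats out) := by unfold Spec_compress_categories; infer_instance

-- ===== CLAIM (what is proved, stated in full; the proofs are below) =====
def Claim_equal_compress_categories : Prop := ∀ (possible_cats : List Int), Dom_compress_categories possible_cats → Spec_compress_categories possible_cats (compress_categories possible_cats)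

-- ===== LEMMAS AND PROOFS =====

theorem take_len (s : List Int) (m : Nat) (hm : m ≤ s.length) : (s.take m).length = m := by
  simp [List.length_take, Nat.min_eq_left hm]

theorem take_getD (s : List Int) (i m : Nat) (him : i < m) :
    (s.take m).getD i 0 = s.getD i 0 := by
  simp [List.getD_eq_getElem?_getD, him]

theorem take_dropLast (s : List Int) (m : Nat) (hm : m ≤ s.length) :
    (s.take m).dropLast = s.take (m - 1) := by
  rw [List.dropLast_eq_take, take_len s m hm, List.take_take]
  congr 1; omega

theorem pyget_some (s : List Int) (i : Nat) (h : i < s.length) :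
    PySem.List.pyGet? s (i : Int) = some (s.getD i 0) := by
  simp [PySem.List.pyGet?_natCast, List.getD_eq_getElem?_getD, List.getElem?_eq_getElem h]

theorem take_last (s : List Int) (m : Nat) (hm0 : 0 < m) (hm : m ≤ s.length) :
    PySem.List.pyGet? (s.take m) (-1) = some (s.getD (m-1) 0) := by
  rw [PySem.List.pyGet?_neg_one, List.getLast?_eq_getElem?, take_len s m hm,
      List.getElem?_take_of_lt (by omega)]
  simp [List.getD_eq_getElem?_getD, List.getElem?_eq_getElem (show m - 1 < s.length by omega)]

-- one-step unfoldings of loopB, with explicit arguments so `rw` targets the copy we mean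
theorem loopB_gap (s : List Int) (out : List (Option Int)) (lo : Nat) (hi : Int) (j : Nat)
    (h1 : (lo : Int) ≤ hi) (h2 : (j : Int) + 1 < (PySem.List.pyGet? s (lo : Int)).getD 0) :
    loopB s out lo hi j = loopB s (out.set j (PySem.List.pyGet? s hi)) lo (hi - 1) (j + 1) := by
  rw [loopB, if_pos h1, if_pos h2]

theorem loopB_place (s : List Int) (out : List (Option Int)) (lo : Nat) (hi : Int) (j : Nat)
    (h1 : (lo : Int) ≤ hi) (h2 : ¬ ((j : Int) + 1 < (PySem.List.pyGet? s (lo : Int)).getD 0)) :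
    loopB s out lo hi j = loopB s (out.set j (PySem.List.pyGet? s (lo : Int))) (lo + 1) hi (j + 1) := by
  rw [loopB, if_pos h1, if_neg h2]

theorem loopB_stop (s : List Int) (out : List (Option Int)) (lo : Nat) (hi : Int) (j : Nat)
    (h1 : ¬ ((lo : Int) ≤ hi)) : loopB s out lo hi j = out := by
  rw [loopB, if_neg h1]

theorem outerA_pop (s : List Int) (r : List (Option Int)) (i j m : Nat)
    (him : i < m) (hm : m ≤ s.length)
    (hc : (j : Int) + 1 < s.getD i 0) :
    outerA (s.take m) r i j =
      outerA (s.take (m - 1)) (r.set j (some (s.getD (m-1) 0))) i (j + 1) := by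
  have hlen : (s.take m).length = m := take_len s m hm
  have hlen1 : (s.take (m-1)).length = m - 1 := take_len s (m-1) (by omega)
  have hinner : innerA (s.take m) r i j (s.getD i 0)
      = innerA (s.take (m-1)) (r.set j (some (s.getD (m-1) 0))) i (j+1) (s.getD i 0) := by
    rw [innerA, if_pos ⟨hc, by omega⟩, take_dropLast s m hm, take_last s m (by omega) hm]
  by_cases him1 : i < m - 1
  · conv_lhs => rw [outerA]
    rw [dif_pos (show i < (s.take m).length by omega)]
    conv_rhs => rw [outerA]
    rw [dif_pos (show i < (s.take (m-1)).length by omega)]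
    simp only [take_getD s i m him, take_getD s i (m-1) him1, hinner]
  · have hstop : innerA (s.take (m-1)) (r.set j (some (s.getD (m-1) 0))) i (j+1) (s.getD i 0)
        = (s.take (m-1), r.set j (some (s.getD (m-1) 0)), j+1) := by
      rw [innerA, if_neg (by rw [hlen1]; omega)]
    conv_lhs => rw [outerA]
    rw [dif_pos (show i < (s.take m).length by omega)]
    simp only [take_getD s i m him, hinner, hstop]
    rw [if_neg (show ¬ i < (s.take (m-1)).length by omega)]
    conv_lhs => rw [outerA]
    rw [dif_neg (show ¬ i + 1 < (s.take (m-1)).length by omega)]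
    conv_rhs => rw [outerA]
    rw [dif_neg (show ¬ i < (s.take (m-1)).length by omega)]

theorem outerA_place (s : List Int) (r : List (Option Int)) (i j m : Nat)
    (him : i < m) (hm : m ≤ s.length)
    (hc : ¬ ((j : Int) + 1 < s.getD i 0)) :
    outerA (s.take m) r i j =
      outerA (s.take m) (r.set j (some (s.getD i 0))) (i + 1) (j + 1) := by
  have hlen : (s.take m).length = m := take_len s m hm
  have hstop : innerA (s.take m) r i j (s.getD i 0) = (s.take m, r, j) := by
    rw [innerA, if_neg (by intro ⟨h1, _⟩; exact hc h1)]
  conv_lhs => rw [outerA]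
  rw [dif_pos (show i < (s.take m).length by omega)]
  simp only [take_getD s i m him, hstop]
  rw [if_pos (show i < (s.take m).length by omega)]

theorem outerA_stop (s : List Int) (r : List (Option Int)) (i j m : Nat)
    (hm : m ≤ s.length) (him : ¬ i < m) :
    outerA (s.take m) r i j = r := by
  have hlen : (s.take m).length = m := take_len s m hm
  conv_lhs => rw [outerA]
  rw [dif_neg (show ¬ i < (s.take m).length by omega)]

theorem main_corr (k : Nat) : ∀ (m i j : Nat) (r : List (Option Int)) (s : List Int),
    m ≤ s.length → m - i ≤ k →
    outerA (s.take m) r i j = loopB s r i ((m : Int) - 1) j := by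
  induction k with
  | zero =>
    intro m i j r s hm hk
    rw [outerA_stop s r i j m hm (by omega), loopB_stop s r i ((m:Int)-1) j (by omega)]
  | succ k ih =>
    intro m i j r s hm hk
    by_cases him : i < m
    · have hget : PySem.List.pyGet? s (i : Int) = some (s.getD i 0) := pyget_some s i (by omega)
      by_cases hc : (j : Int) + 1 < s.getD i 0
      · have e2 : PySem.List.pyGet? s ((m : Int) - 1) = some (s.getD (m-1) 0) := by
          rw [show ((m:Int) - 1) = (((m-1 : Nat)) : Int) by omega]
          exact pyget_some s (m-1) (by omega)
        have hih := ih (m-1) i (j+1) (r.set j (some (s.getD (m-1) 0))) s (by omega) (by omega)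
        rw [show (((m-1 : Nat)) : Int) - 1 = (m : Int) - 1 - 1 by omega] at hih
        rw [outerA_pop s r i j m him hm hc, hih,
            loopB_gap s r i ((m:Int)-1) j (by omega) (by rw [hget]; simpa using hc), e2]
      · have hih := ih m (i+1) (j+1) (r.set j (some (s.getD i 0))) s hm (by omega)
        rw [outerA_place s r i j m him hm hc, hih,
            loopB_place s r i ((m:Int)-1) j (by omega) (by rw [hget]; simpa using hc), hget]
    · rw [outerA_stop s r i j m hm him, loopB_stop s r i ((m:Int)-1) j (by omega)]

-- ===== VERDICT (by name: the statement is the Claim_ definition above) =====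
theorem compress_categories_spec : Claim_equal_compress_categories := by
  intro pc _
  unfold Spec_compress_categories compress_categories compress_categories_alt
  have h := main_corr (PySem.List.sorted pc (fun x => x) false).length
      (PySem.List.sorted pc (fun x => x) false).length 0 0
      (List.replicate (PySem.List.sorted pc (fun x => x) false).length none)
      (PySem.List.sorted pc (fun x => x) false) le_rfl (by omega)
  rw [List.take_length] at h
  exact h
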